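-- pv_equiv track=rewrite | github.com/matus-ruscak/AdventOfCode | utils.py | split_generator
-- ===== SOURCE A (Python) =====
-- def split_generator(sequence, sep):
--     chunk = []
--     for val in sequence:
--         if val == sep:
--             yield chunk
--             chunk = []
--         else:
--             chunk.append(val)
--     yield chunk
-- ===== SOURCE B (Python) =====
-- def split_generator(sequence, sep):
--     items = list(sequence)
--     bounds = [-1] + [i for i, v in enumerate(items) if v == sep] + [len(items)]
--     for a, b in zip(bounds, bounds[1:]):
--         yield items[a + 1:b]
-- ===== Notes on version B (the rewrite author's own statement) =====
-- stated objective: alternative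
-- what changed: Replaces A's element-by-element chunk accumulation with a two-phase index-then-slice strategy: collect the separator positions once, then slice the list between consecutive boundaries.
import Mathlib
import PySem

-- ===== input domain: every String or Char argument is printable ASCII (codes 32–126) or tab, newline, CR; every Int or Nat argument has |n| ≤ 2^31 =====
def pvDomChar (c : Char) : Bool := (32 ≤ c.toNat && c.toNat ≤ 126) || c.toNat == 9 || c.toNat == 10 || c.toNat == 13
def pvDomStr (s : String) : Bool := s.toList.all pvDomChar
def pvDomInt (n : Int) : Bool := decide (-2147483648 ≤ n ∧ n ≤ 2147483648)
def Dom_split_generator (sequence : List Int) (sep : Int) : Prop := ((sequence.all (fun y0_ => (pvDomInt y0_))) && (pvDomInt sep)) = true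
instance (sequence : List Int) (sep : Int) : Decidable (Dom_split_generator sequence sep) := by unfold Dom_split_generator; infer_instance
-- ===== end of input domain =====

-- B replaces A's element-by-element accumulation with a separator-index-then-slice pass
-- (alternative decomposition, same cost); B materialises the (finite) sequence first,
-- which only matters for lazy iterables outside this List domain.

-- ===== PORT A =====
-- A is a generator; its yielded values are collected into a list.
def split_generator (sequence : List Int) (sep : Int) : List (List Int) :=
  let st := sequence.foldl
    (fun (st : List (List Int) × List Int) val =>
      if val = sep then (st.1 ++ [st.2], ([] : List Int)) else (st.1, st.2 ++ [val]))
    ([], [])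
  st.1 ++ [st.2]

-- ===== PORT B =====
def split_generator_alt (sequence : List Int) (sep : Int) : List (List Int) :=
  let items := sequence
  let bounds : List Int :=
    -1 :: ((PySem.List.enumerate items 0).filterMap
      (fun p => if p.2 = sep then some p.1 else none) ++ [(items.length : Int)])
  (bounds.zip bounds.tail).map
    (fun ab => PySem.List.slice items (some (ab.1 + 1)) (some ab.2))

-- ===== PRECONDITION & SPEC =====
def Spec_split_generator (sequence : List Int) (sep : Int) (out : List (List Int)) : Prop := out = split_generator_alt sequence sep
instance (sequence : List Int) (sep : Int) (out : List (List Int)) : Decidable (Spec_split_generator sequence sep out) := by unfold Spec_split_generator; infer_instance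

-- ===== CLAIM (what is proved, stated in full; the proofs are below) =====
def Claim_equal_split_generator : Prop := ∀ (sequence : List Int) (sep : Int), Dom_split_generator sequence sep → Spec_split_generator sequence sep (split_generator sequence sep)

-- ===== LEMMAS AND PROOFS =====

-- canonical recursive splitter both ports are reduced to
def consHead (p : List Int) : List (List Int) → List (List Int)
  | [] => [p]
  | c :: cs => (p ++ c) :: cs

def splitRec (sep : Int) : List Int → List (List Int)
  | [] => [[]]
  | v :: t => if v = sep then [] :: splitRec sep t else consHead [v] (splitRec sep t)

lemma splitRec_ne_nil (sep : Int) (l : List Int) : splitRec sep l ≠ [] := by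
  cases l with
  | nil => simp [splitRec]
  | cons v t =>
    simp only [splitRec]
    split
    · simp
    · cases h : splitRec sep t <;> simp [consHead]

lemma consHead_nil_of_ne (l : List (List Int)) (h : l ≠ []) : consHead [] l = l := by
  cases l with
  | nil => exact absurd rfl h
  | cons c cs => simp [consHead]

lemma consHead_consHead (p q : List Int) (l : List (List Int)) :
    consHead p (consHead q l) = consHead (p ++ q) l := by
  cases l <;> simp [consHead]

-- the map over consecutive boundary pairs, as used by port B
def pairsMap (items : List Int) (L : List Int) : List (List Int) :=
  (L.zip L.tail).map (fun ab => PySem.List.slice items (some (ab.1 + 1)) (some ab.2))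

lemma pairsMap_cons (items : List Int) (a b : Int) (L : List Int) :
    pairsMap items (a :: b :: L)
      = PySem.List.slice items (some (a + 1)) (some b) :: pairsMap items (b :: L) := by
  simp [pairsMap]

lemma pairsMap_single (items : List Int) (a : Int) : pairsMap items [a] = [] := by
  simp [pairsMap]

lemma consHead_cons (p c : List Int) (cs : List (List Int)) :
    consHead p (c :: cs) = (p ++ c) :: cs := rfl

-- A's fold, characterised
lemma foldA (sep : Int) : ∀ (seq : List Int) (done : List (List Int)) (cur : List Int),
    (seq.foldl
      (fun (st : List (List Int) × List Int) val =>
        if val = sep then (st.1 ++ [st.2], ([] : List Int)) else (st.1, st.2 ++ [val]))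
      (done, cur)).1
      ++ [(seq.foldl
      (fun (st : List (List Int) × List Int) val =>
        if val = sep then (st.1 ++ [st.2], ([] : List Int)) else (st.1, st.2 ++ [val]))
      (done, cur)).2]
    = done ++ consHead cur (splitRec sep seq) := by
  intro seq
  induction seq with
  | nil => intro done cur; simp [splitRec, consHead]
  | cons v t ih =>
    intro done cur
    simp only [List.foldl_cons]
    by_cases hv : v = sep
    · rw [if_pos hv, ih]
      rw [consHead_nil_of_ne _ (splitRec_ne_nil sep t)]
      rw [show splitRec sep (v :: t) = [] :: splitRec sep t from by simp [splitRec, hv]]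
      rw [consHead_cons]
      simp
    · rw [if_neg hv, ih]
      rw [show splitRec sep (v :: t) = consHead [v] (splitRec sep t) from by
        simp [splitRec, hv]]
      rw [consHead_consHead]

-- B's boundary walk, characterised
lemma chunksB (sep : Int) : ∀ (rest : List Int) (k j : Nat) (items : List Int) (a : Int),
    items.drop k = rest → j ≤ k → a + 1 = (j : Int) →
    pairsMap items
      (a :: ((PySem.List.enumerate rest (k : Int)).filterMap
        (fun p => if p.2 = sep then some p.1 else none) ++ [(items.length : Int)]))
    = consHead ((items.drop j).take (k - j)) (splitRec sep rest) := by
  intro rest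
  induction rest with
  | nil =>
    intro k j items a hdrop hjk ha
    have hlen : items.length ≤ k := by
      have := congrArg List.length hdrop; simp at this; omega
    have h1 : (items.drop j).take (items.length - j) = items.drop j := by
      apply List.take_of_length_le; simp only [List.length_drop]; omega
    have h2 : (items.drop j).take (k - j) = items.drop j := by
      apply List.take_of_length_le; simp only [List.length_drop]; omega
    simp only [PySem.List.enumerate_nil, List.filterMap_nil, List.nil_append]
    rw [pairsMap_cons, pairsMap_single, ha, PySem.List.slice_natCast]
    rw [show splitRec sep ([] : List Int) = [[]] from rfl, consHead_cons]
    rw [h1, h2]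
    simp
  | cons v t ih =>
    intro k j items a hdrop hjk ha
    have hk : k < items.length := by
      have := congrArg List.length hdrop; simp at this; omega
    have hdrop' : items.drop (k + 1) = t := by
      have h := congrArg (List.drop 1) hdrop
      simpa [List.drop_drop, Nat.add_comm] using h
    have hget : items[k]? = some v := by
      have h0 : (items.drop k)[0]? = some v := by rw [hdrop]; simp
      simpa using h0
    rw [PySem.List.enumerate_cons]
    have hcast : (k : Int) + 1 = ((k + 1 : Nat) : Int) := by push_cast; ring
    by_cases hv : v = sep
    · simp only [List.filterMap_cons, if_pos hv, List.cons_append]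
      rw [pairsMap_cons]
      rw [hcast, ih (k + 1) (k + 1) items (k : Int) hdrop' (le_refl _) (by push_cast; ring)]
      simp only [Nat.sub_self, List.take_zero]
      rw [consHead_nil_of_ne _ (splitRec_ne_nil sep t)]
      rw [ha, PySem.List.slice_natCast]
      rw [show splitRec sep (v :: t) = [] :: splitRec sep t from by simp [splitRec, hv]]
      rw [consHead_cons]
      simp
    · simp only [List.filterMap_cons, if_neg hv]
      rw [hcast, ih (k + 1) j items a hdrop' (by omega) ha]
      rw [show splitRec sep (v :: t) = consHead [v] (splitRec sep t) from by
        simp [splitRec, hv]]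
      rw [consHead_consHead]
      have hstep : (items.drop j).take (k + 1 - j) = (items.drop j).take (k - j) ++ [v] := by
        have h1 : k + 1 - j = (k - j) + 1 := by omega
        have h2 : (items.drop j)[k - j]? = some v := by
          rw [List.getElem?_drop, show j + (k - j) = k from by omega, hget]
        rw [h1, List.take_add_one, h2]; simp
      rw [hstep]

-- ===== VERDICT (by name: the statement is the Claim_ definition above) =====
theorem split_generator_spec : Claim_equal_split_generator := by
  intro sequence sep _
  show split_generator sequence sep = split_generator_alt sequence sep
  have hA : split_generator sequence sep = [] ++ consHead [] (splitRec sep sequence) :=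
    foldA sep sequence [] []
  have hB : split_generator_alt sequence sep
      = pairsMap sequence ((-1 : Int) :: ((PySem.List.enumerate sequence 0).filterMap
          (fun p => if p.2 = sep then some p.1 else none) ++ [(sequence.length : Int)])) := rfl
  have hC := chunksB sep sequence 0 0 sequence (-1) (by simp) (le_refl 0) (by norm_num)
  simp only [Nat.cast_zero, Nat.sub_self, List.take_zero, List.drop_zero] at hC
  rw [hA, hB, hC]
  simp
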